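-- pv_equiv track=rewrite | github.com/hansie4/hans-aoc | 2023/Day 12/main.py | isStringValid
-- ===== SOURCE A (Python) =====
-- def isStringValid(inputString: str, springs: list):
--     s = inputString.replace(".", " ")
--     s = s.replace("?", " ")
--     s = s.split()
--
--     if len(s) != len(springs):
--         return False
--
--     for x in range(len(springs)):
--         if len(s[x]) != springs[x]:
--             return False
--
--     return True
-- ===== SOURCE B (Python) =====
-- def isStringValid(inputString: str, springs: list):
--     seps = ".? \t\n\r\x0b\x0c"
--     i = 0
--     run = 0
--     n = len(springs)
--     for ch in inputString:
--         if ch in seps: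
--             if run:
--                 if i >= n or springs[i] != run:
--                     return False
--                 i += 1
--                 run = 0
--         else:
--             run += 1
--     if run:
--         if i >= n or springs[i] != run:
--             return False
--         i += 1
--     return i == n
-- ===== Notes on version B (the rewrite author's own statement) =====
-- stated objective: alternative
-- what changed: A builds an intermediate word list via replace/replace/split and then compares lengths by index; B makes one left-to-right pass over the string, keeping a run length for the current group and a single cursor into springs, with no intermediate strings.
import Mathlib
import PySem

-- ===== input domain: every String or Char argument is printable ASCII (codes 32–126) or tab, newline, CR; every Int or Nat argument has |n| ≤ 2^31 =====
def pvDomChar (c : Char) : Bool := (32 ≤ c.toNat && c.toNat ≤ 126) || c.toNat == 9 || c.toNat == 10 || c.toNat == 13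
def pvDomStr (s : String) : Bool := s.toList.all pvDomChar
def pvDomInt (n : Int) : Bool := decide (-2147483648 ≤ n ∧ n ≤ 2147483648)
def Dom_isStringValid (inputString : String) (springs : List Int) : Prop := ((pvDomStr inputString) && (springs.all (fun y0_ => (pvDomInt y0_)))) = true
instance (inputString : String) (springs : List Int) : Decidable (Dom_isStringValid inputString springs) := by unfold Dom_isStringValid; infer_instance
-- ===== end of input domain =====

-- B replaces A's replace/split/index-compare pipeline by a single left-to-right pass holding a
-- run length and one index into springs (objective: alternative decomposition, one pass, no
-- intermediate word list).

-- ===== PORT A =====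
-- for x in range(len(springs)): if len(s[x]) != springs[x]: return False
def isStringValidLoopA (s : List String) (springs : List Int) (x : Nat) : Bool :=
  if _h : x < springs.length then
    if PySem.Str.len (PySem.List.pyGetD s (x : Int) "") ≠ PySem.List.pyGetD springs (x : Int) 0 then false
    else isStringValidLoopA s springs (x + 1)
  else true
termination_by springs.length - x

def isStringValid (inputString : String) (springs : List Int) : Bool :=
  let s1 := PySem.Str.replace inputString "." " "
  let s2 := PySem.Str.replace s1 "?" " "
  let s := PySem.Str.split₀ s2
  if PySem.List.len s ≠ PySem.List.len springs then false
  else isStringValidLoopA s springs 0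

-- ===== PORT B =====
-- ch in ".? \t\n\r\x0b\x0c"
def sepB (c : Char) : Bool :=
  c == '.' || c == '?' || c == ' ' || c == '\t' || c == '\n' || c == '\r' ||
  c == '\x0b' || c == '\x0c'

-- the for-loop of Source B (state: i, run), followed by the post-loop flush and 'i == n'
def altGo (springs : List Int) (n : Nat) (cs : List Char) (i run : Nat) : Bool :=
  match cs with
  | [] =>
    if run ≠ 0 then
      if i ≥ n ∨ PySem.List.pyGetD springs (i : Int) 0 ≠ (run : Int) then false
      else (i + 1) == n
    else i == n
  | c :: rest =>
    if sepB c then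
      if run ≠ 0 then
        if i ≥ n ∨ PySem.List.pyGetD springs (i : Int) 0 ≠ (run : Int) then false
        else altGo springs n rest (i + 1) 0
      else altGo springs n rest i 0
    else altGo springs n rest i (run + 1)

def isStringValid_alt (inputString : String) (springs : List Int) : Bool :=
  altGo springs springs.length inputString.toList 0 0

-- ===== PRECONDITION & SPEC =====
def Spec_isStringValid (inputString : String) (springs : List Int) (out : Bool) : Prop := out = isStringValid_alt inputString springs
instance (inputString : String) (springs : List Int) (out : Bool) : Decidable (Spec_isStringValid inputString springs out) := by unfold Spec_isStringValid; infer_instance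

-- ===== CLAIM (what is proved, stated in full; the proofs are below) =====
def Claim_equal_isStringValid : Prop := ∀ (inputString : String) (springs : List Int), Dom_isStringValid inputString springs → Spec_isStringValid inputString springs (isStringValid inputString springs)

-- ===== LEMMAS AND PROOFS =====

-- group lengths of maximal p-free runs, with a pending run of length r
def gAux (p : Char → Bool) (cs : List Char) (r : Nat) : List Int :=
  match cs with
  | [] => if r = 0 then [] else [(r : Int)]
  | c :: rest => if p c then (if r = 0 then gAux p rest 0 else (r : Int) :: gAux p rest 0)
                 else gAux p rest (r + 1)

-- single-character replace is a map
theorem replace_go_single (c d : Char) :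
    ∀ (fuel : Nat) (l acc : List Char), l.length ≤ fuel →
      PySem.Chars.replace.go [c] [d] fuel l acc
        = acc.reverse ++ l.map (fun x => if x = c then d else x) := by
  intro fuel
  induction fuel with
  | zero => intro l acc h; cases l with
    | nil => simp [PySem.Chars.replace.go]
    | cons a t => simp at h
  | succ k ih =>
    intro l acc h
    cases l with
    | nil => simp [PySem.Chars.replace.go]
    | cons a t =>
      simp only [PySem.Chars.replace.go, List.isPrefixOf, List.map]
      by_cases hac : c == a
      · simp only [hac]
        simp only [beq_iff_eq] at hac
        rw [ih]
        · subst hac; simp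
        · simpa using Nat.le_of_succ_le_succ (by simpa using h)
      · simp only [hac, Bool.false_and]
        rw [ih t (a :: acc) (by simpa using Nat.le_of_succ_le_succ (by simpa using h))]
        have : ¬ a = c := by intro hh; subst hh; simp at hac
        simp [this]

theorem replace_single (cs : List Char) (c d : Char) :
    PySem.Chars.replace cs [c] [d] = cs.map (fun x => if x = c then d else x) := by
  simp [PySem.Chars.replace, replace_go_single c d cs.length cs [] le_rfl]

-- split₀.go's word lengths are gAux isspace
theorem split_go_lengths :
    ∀ (ds cur : List Char) (acc : List (List Char)),
      (PySem.Chars.split₀.go ds cur acc).map (fun w => (w.length : Int))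
        = acc.reverse.map (fun w => (w.length : Int)) ++ gAux PySem.Chars.isspace ds cur.length := by
  intro ds
  induction ds with
  | nil =>
    intro cur acc
    cases cur with
    | nil => simp [PySem.Chars.split₀.go, gAux]
    | cons a t => simp [PySem.Chars.split₀.go, gAux]
  | cons c rest ih =>
    intro cur acc
    by_cases hs : PySem.Chars.isspace c
    · cases cur with
      | nil => simp [PySem.Chars.split₀.go, hs, gAux, ih]
      | cons a t =>
        simp only [PySem.Chars.split₀.go, hs, if_true, List.isEmpty_cons, Bool.false_eq_true,
          if_false, ih, gAux, List.length_cons]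
        simp
    · cases cur with
      | nil => simp [PySem.Chars.split₀.go, hs, gAux, ih]
      | cons a t => simp [PySem.Chars.split₀.go, hs, gAux, ih]

theorem split_lengths (ds : List Char) :
    (PySem.Chars.split₀ ds).map (fun w => (w.length : Int)) = gAux PySem.Chars.isspace ds 0 := by
  simpa using split_go_lengths ds [] []

theorem char_eq_iff (c d : Char) : (c = d) ↔ c.toNat = d.toNat := by
  constructor
  · rintro rfl; rfl
  · intro h; exact Char.ext (UInt32.toNat_inj.mp h)

-- on domain characters, isspace after the two replaces is exactly sepB
theorem sep_char (c : Char) (h : pvDomChar c = true) :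
    PySem.Chars.isspace (if (if c = '.' then ' ' else c) = '?' then ' ' else if c = '.' then ' ' else c)
      = sepB c := by
  simp only [pvDomChar, Bool.or_eq_true, Bool.and_eq_true, decide_eq_true_eq, beq_iff_eq] at h
  by_cases h1 : c = '.'
  · subst h1; decide
  by_cases h2 : c = '?'
  · subst h2; decide
  rw [if_neg h1, if_neg h2]
  rw [char_eq_iff, show ('.' : Char).toNat = 46 from rfl] at h1
  rw [char_eq_iff, show ('?' : Char).toNat = 63 from rfl] at h2
  rw [Bool.eq_iff_iff]
  simp only [sepB, PySem.Chars.isspace, Bool.or_eq_true, Bool.and_eq_true, beq_iff_eq,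
    decide_eq_true_eq, char_eq_iff,
    show ('.' : Char).toNat = 46 from rfl, show ('?' : Char).toNat = 63 from rfl,
    show (' ' : Char).toNat = 32 from rfl, show ('\t' : Char).toNat = 9 from rfl,
    show ('\n' : Char).toNat = 10 from rfl, show ('\r' : Char).toNat = 13 from rfl,
    show ('\x0b' : Char).toNat = 11 from rfl, show ('\x0c' : Char).toNat = 12 from rfl]
  omega

theorem gAux_repl (cs : List Char) (h : cs.all pvDomChar = true) :
    ∀ r, gAux PySem.Chars.isspace
        ((cs.map (fun x => if x = '.' then ' ' else x)).map (fun x => if x = '?' then ' ' else x)) r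
      = gAux sepB cs r := by
  induction cs with
  | nil => intro r; simp [gAux]
  | cons c rest ih =>
    simp only [List.all_cons, Bool.and_eq_true] at h
    intro r
    simp only [List.map_cons, gAux, sep_char c h.1]
    have ih' := ih h.2
    simp only [List.map_map] at ih'
    by_cases hs : sepB c = true
    · simp [hs, List.map_map, ih']
    · simp [hs, List.map_map, ih']

-- A's loop
theorem loopA_iff (s : List String) (springs : List Int) :
    ∀ x, s.length = springs.length →
      (isStringValidLoopA s springs x = true
        ↔ (s.drop x).map (fun w => PySem.Str.len w) = springs.drop x) := by
  suffices H : ∀ (k x : Nat), springs.length - x = k → s.length = springs.length →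
      (isStringValidLoopA s springs x = true
        ↔ (s.drop x).map (fun w => PySem.Str.len w) = springs.drop x) by
    intro x h; exact H _ x rfl h
  intro k
  induction k with
  | zero =>
    intro x hk hlen
    have hx : springs.length ≤ x := by omega
    rw [isStringValidLoopA]
    simp [Nat.not_lt_of_le hx, List.drop_eq_nil_of_le, hx, hlen ▸ hx]
  | succ m ih =>
    intro x hk hlen
    have hx : x < springs.length := by omega
    have hxs : x < s.length := by omega
    rw [isStringValidLoopA]
    simp only [hx, dif_pos, PySem.List.pyGetD_natCast, List.getD_eq_getElem s "" hxs,
      List.getD_eq_getElem springs 0 hx, ne_eq, ite_not]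
    rw [List.drop_eq_getElem_cons hxs, List.drop_eq_getElem_cons hx, List.map_cons]
    by_cases he : PySem.Str.len s[x] = springs[x]
    · rw [if_pos he, ih (x + 1) (by omega) hlen, he]
      constructor
      · intro h2; rw [h2]
      · intro h2; exact (List.cons_inj_right _).mp h2
    · rw [if_neg he]
      simp only [Bool.false_eq_true, false_iff]
      intro h2
      exact he (List.cons_eq_cons.mp h2).1

theorem A_iff (inputString : String) (springs : List Int) :
    isStringValid inputString springs = true
      ↔ (PySem.Chars.split₀
            ((inputString.toList.map (fun x => if x = '.' then ' ' else x)).map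
              (fun x => if x = '?' then ' ' else x))).map (fun w => (w.length : Int)) = springs := by
  have hs : PySem.Str.split₀ (PySem.Str.replace (PySem.Str.replace inputString "." " ") "?" " ")
      = ((PySem.Chars.split₀
            ((inputString.toList.map (fun x => if x = '.' then ' ' else x)).map
              (fun x => if x = '?' then ' ' else x)))).map String.ofList := by
    simp [PySem.Str.split₀, PySem.Str.replace, String.toList_ofList,
      show ("." : String).toList = ['.'] from rfl, show ("?" : String).toList = ['?'] from rfl,
      show (" " : String).toList = [' '] from rfl, replace_single]
  set ws := (PySem.Chars.split₀
      ((inputString.toList.map (fun x => if x = '.' then ' ' else x)).map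
        (fun x => if x = '?' then ' ' else x))) with hws
  rw [isStringValid]
  simp only [hs, PySem.List.len_eq, List.length_map, ne_eq, Nat.cast_inj, ite_not]
  by_cases hlen : ws.length = springs.length
  · rw [if_pos hlen]
    rw [loopA_iff (ws.map String.ofList) springs 0 (by simpa using hlen)]
    simp [List.map_map, Function.comp_def, PySem.Str.len_eq]
  · rw [if_neg hlen]
    simp only [Bool.false_eq_true, false_iff]
    intro h2
    exact hlen (by simpa using congrArg List.length h2)

-- B's loop
theorem altGo_iff (springs : List Int) :
    ∀ (cs : List Char) (i run : Nat), i ≤ springs.length →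
      (altGo springs springs.length cs i run = true ↔ springs.drop i = gAux sepB cs run) := by
  intro cs
  induction cs with
  | nil =>
    intro i run hi
    rw [altGo]
    by_cases hr : run = 0
    · subst hr
      simp only [ne_eq, not_true_eq_false, reduceIte, beq_iff_eq, gAux, List.drop_eq_nil_iff]
      constructor
      · intro h; omega
      · intro h; omega
    · rw [if_pos hr]
      by_cases hc : i ≥ springs.length ∨ PySem.List.pyGetD springs (i : Int) 0 ≠ (run : Int)
      · rw [if_pos hc]
        simp only [Bool.false_eq_true, false_iff, gAux, if_neg hr]
        intro h2
        rcases hc with hc | hc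
        · rw [List.drop_eq_nil_of_le hc] at h2; simp at h2
        · have hx : i < springs.length := by
            by_contra hx
            rw [List.drop_eq_nil_of_le (by omega)] at h2; simp at h2
          rw [List.drop_eq_getElem_cons hx] at h2
          rw [PySem.List.pyGetD_natCast, List.getD_eq_getElem springs 0 hx] at hc
          exact hc (List.cons_eq_cons.mp h2).1
      · rw [if_neg hc]
        push Not at hc
        obtain ⟨hx, hv⟩ := hc
        rw [PySem.List.pyGetD_natCast, List.getD_eq_getElem springs 0 hx] at hv
        rw [List.drop_eq_getElem_cons hx]
        simp only [gAux, if_neg hr, beq_iff_eq, hv,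
          List.cons_eq_cons, true_and, List.drop_eq_nil_iff]
        omega
  | cons c rest ih =>
    intro i run hi
    rw [altGo]
    by_cases hsep : sepB c = true
    · rw [if_pos hsep]
      by_cases hr : run = 0
      · subst hr
        simp only [ne_eq, not_true_eq_false, reduceIte, gAux, hsep, if_pos]
        exact ih i 0 hi
      · rw [if_pos hr]
        by_cases hc : i ≥ springs.length ∨ PySem.List.pyGetD springs (i : Int) 0 ≠ (run : Int)
        · rw [if_pos hc]
          simp only [Bool.false_eq_true, false_iff, gAux, hsep, if_pos, if_neg hr]
          intro h2
          rcases hc with hc | hc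
          · rw [List.drop_eq_nil_of_le hc] at h2; simp at h2
          · have hx : i < springs.length := by
              by_contra hx
              rw [List.drop_eq_nil_of_le (by omega)] at h2; simp at h2
            rw [List.drop_eq_getElem_cons hx] at h2
            rw [PySem.List.pyGetD_natCast, List.getD_eq_getElem springs 0 hx] at hc
            exact hc (List.cons_eq_cons.mp h2).1
        · rw [if_neg hc]
          push Not at hc
          obtain ⟨hx, hv⟩ := hc
          rw [PySem.List.pyGetD_natCast, List.getD_eq_getElem springs 0 hx] at hv
          rw [ih (i + 1) 0 (by omega)]
          rw [List.drop_eq_getElem_cons hx]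
          simp [gAux, hsep, if_neg hr, hv]
    · rw [if_neg hsep]
      rw [ih i (run + 1) hi]
      simp [gAux, hsep]

-- ===== VERDICT (by name: the statement is the Claim_ definition above) =====
theorem isStringValid_spec : Claim_equal_isStringValid := by
  intro inputString springs hdom
  unfold Spec_isStringValid isStringValid_alt
  have hdom' : inputString.toList.all pvDomChar = true := by
    have := hdom
    unfold Dom_isStringValid at this
    simp only [Bool.and_eq_true, pvDomStr] at this
    exact this.1
  rw [Bool.eq_iff_iff]
  rw [A_iff inputString springs, altGo_iff springs inputString.toList 0 0 (Nat.zero_le _)]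
  rw [split_lengths, gAux_repl inputString.toList hdom' 0]
  simp [eq_comm]
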